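-- pv_equiv track=rewrite | github.com/LucaSforza/algoritmi2 | esercizi/es2.py | es2filR
-- ===== SOURCE A (Python) =====
-- def es2filR(ins:list[int],sogl:int,xIndex:int=0,yIndex:int=0)->int:
--     insiemeInEsame = ins[:xIndex]+ins[len(ins)-yIndex:]
--     sommaInsiemeInEsame = sum(insiemeInEsame)
--     zcout= 0
--     if sommaInsiemeInEsame <= sogl and xIndex+yIndex<len(ins):
--         maxX = es2filR(ins,sogl,xIndex+1,yIndex)
--         maxY = es2filR(ins,sogl,xIndex,yIndex+1)
--         maxFigli = max(maxX,maxY)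
--         zc = insiemeInEsame.count(0)
--         zcout = max(zc,maxFigli)
--     return zcout
-- ===== SOURCE B (Python) =====
-- def es2filR(ins, sogl, xIndex=0, yIndex=0):
--     n = len(ins)
--     # prefix-sum and prefix-zero-count tables, built once
--     P = [0]
--     Z = [0]
--     s = 0
--     z = 0
--     for v in ins:
--         s = s + v
--         z = z + (1 if v == 0 else 0)
--         P.append(s)
--         Z.append(z)
--
--     def clamp(i):
--         # Python slice-index normalisation for ins[:i] / ins[i:]
--         if i < 0:
--             i = i + n
--         if i < 0:
--             return 0
--         if i > n:
--             return n
--         return i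
--
--     def stats(x, y):
--         # (sum, zero-count) of ins[:x] + ins[n-y:]
--         e = clamp(x)
--         t = clamp(n - y)
--         return P[e] + P[n] - P[t], Z[e] + Z[n] - Z[t]
--
--     sm0, _ = stats(xIndex, yIndex)
--     if not (sm0 <= sogl and xIndex + yIndex < n):
--         return 0
--
--     # bottom-up DP over diagonals tot = x + y, from tot = n (all zeros) down
--     # to tot = xIndex + yIndex; row[i] = value of state (xIndex + i, tot - xIndex - i)
--     prev = [0] * (n - xIndex - yIndex + 1)
--     for tot in range(n - 1, xIndex + yIndex - 1, -1):
--         cur = []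
--         for i in range(tot - xIndex - yIndex + 1):
--             x = xIndex + i
--             y = tot - x
--             sm, zc = stats(x, y)
--             if sm <= sogl:
--                 cur.append(max(zc, max(prev[i], prev[i + 1])))
--             else:
--                 cur.append(0)
--         prev = cur
--     return prev[0]
-- ===== Notes on version B (the rewrite author's own statement) =====
-- stated objective: alternative
-- what changed: Replaces A's exponential two-child recursion over (xIndex,yIndex) states with a bottom-up dynamic program over the diagonals tot=xIndex+yIndex, using prefix-sum and prefix-zero-count tables built once so each state's slice sum and zero count is O(1).
-- outside the precondition, e.g. on es2filR([1, 2], 10, -1, 0): A returns 0, B returns 0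
import Mathlib
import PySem

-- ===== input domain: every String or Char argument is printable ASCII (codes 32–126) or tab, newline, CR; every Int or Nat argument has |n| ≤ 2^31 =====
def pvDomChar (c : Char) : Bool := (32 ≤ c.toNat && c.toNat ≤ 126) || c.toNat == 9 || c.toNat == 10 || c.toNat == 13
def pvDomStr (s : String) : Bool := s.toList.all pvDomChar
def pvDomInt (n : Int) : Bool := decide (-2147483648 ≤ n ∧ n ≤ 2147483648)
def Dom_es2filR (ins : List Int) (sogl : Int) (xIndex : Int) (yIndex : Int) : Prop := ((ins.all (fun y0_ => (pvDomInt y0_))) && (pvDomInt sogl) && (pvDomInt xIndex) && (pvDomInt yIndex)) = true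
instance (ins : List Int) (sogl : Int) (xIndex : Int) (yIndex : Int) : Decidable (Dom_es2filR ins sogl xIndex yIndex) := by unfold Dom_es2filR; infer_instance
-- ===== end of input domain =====

-- B replaces A's branching recursion by a bottom-up diagonal dynamic program over the
-- (prefix,suffix) states, with prefix-sum / prefix-zero-count tables built once (objective: alternative).


-- ===== PORT A =====
-- literal transliteration of Source A: ins[:xIndex] + ins[len(ins)-yIndex:], recursion on both children
def es2filR (ins : List Int) (sogl : Int) (xIndex : Int) (yIndex : Int) : Int :=
  let insiemeInEsame := PySem.List.slice ins none (some xIndex) ++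
                        PySem.List.slice ins (some (PySem.List.len ins - yIndex)) none
  let sommaInsiemeInEsame := insiemeInEsame.sum
  if h : sommaInsiemeInEsame ≤ sogl ∧ xIndex + yIndex < PySem.List.len ins then
    let maxX := es2filR ins sogl (xIndex + 1) yIndex
    let maxY := es2filR ins sogl xIndex (yIndex + 1)
    let maxFigli := max maxX maxY
    let zc : Int := PySem.List.count insiemeInEsame 0
    max zc maxFigli
  else 0
termination_by (PySem.List.len ins - xIndex - yIndex).toNat
decreasing_by
  · simp only [PySem.List.len_eq] at h ⊢; omega
  · simp only [PySem.List.len_eq] at h ⊢; omega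

-- ===== PORT B =====
-- Source B's clamp: Python slice-index normalisation
def altClamp (n i : Int) : Int :=
  let i := if i < 0 then i + n else i
  if i < 0 then 0 else if i > n then n else i

-- Source B's table-building loop: P, Z, s, z
def altTables (ins : List Int) : List Int × List Int × Int × Int :=
  ins.foldl (fun st v =>
    let s := st.2.2.1 + v
    let z := st.2.2.2 + (if v = 0 then (1 : Int) else 0)
    (st.1 ++ [s], st.2.1 ++ [z], s, z)) ([0], [0], 0, 0)

-- Source B's stats: (sum, zero-count) of ins[:x] + ins[n-y:] from the tables
def altStats (P Z : List Int) (n x y : Int) : Int × Int :=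
  let e := altClamp n x
  let t := altClamp n (n - y)
  (PySem.List.pyGetD P e 0 + PySem.List.pyGetD P n 0 - PySem.List.pyGetD P t 0,
   PySem.List.pyGetD Z e 0 + PySem.List.pyGetD Z n 0 - PySem.List.pyGetD Z t 0)

def es2filR_alt (ins : List Int) (sogl : Int) (xIndex : Int) (yIndex : Int) : Int :=
  let n : Int := PySem.List.len ins
  let st := altTables ins
  let P := st.1
  let Z := st.2.1
  let sm0 := (altStats P Z n xIndex yIndex).1
  if ¬ (sm0 ≤ sogl ∧ xIndex + yIndex < n) then 0
  else
    let prev0 : List Int := List.replicate (n - xIndex - yIndex + 1).toNat 0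
    let prev := (PySem.List.pyRange (n - 1) (xIndex + yIndex - 1) (-1)).foldl
      (fun prev tot =>
        (PySem.List.pyRange 0 (tot - xIndex - yIndex + 1) 1).foldl
          (fun cur i =>
            let x := xIndex + i
            let y := tot - x
            let sz := altStats P Z n x y
            cur ++ [if sz.1 ≤ sogl then
                      max sz.2 (max (PySem.List.pyGetD prev i 0) (PySem.List.pyGetD prev (i + 1) 0))
                    else 0])
          [])
      prev0
    PySem.List.pyGetD prev 0 0  -- prev[0]; the final row always has length 1

-- ===== PRECONDITION & SPEC =====
-- Pre_ excludes inputs with a negative index on which A actually recurses: there Python's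
-- negative-slice wraparound makes the recursion depth len(ins)-xIndex-yIndex, so CPython raises
-- RecursionError on all but the shallowest of them (and B's DP table would be equally infeasible);
-- inputs whose top-level set already fails the threshold (or whose indices cover the list) are kept,
-- A returns 0 on them without recursing.
def Pre_es2filR (ins : List Int) (sogl : Int) (xIndex : Int) (yIndex : Int) : Prop :=
  (0 ≤ xIndex ∧ 0 ≤ yIndex) ∨
  ¬ ((PySem.List.slice ins none (some xIndex) ++
      PySem.List.slice ins (some (PySem.List.len ins - yIndex)) none).sum ≤ sogl ∧
     xIndex + yIndex < PySem.List.len ins)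
instance (ins : List Int) (sogl : Int) (xIndex : Int) (yIndex : Int) : Decidable (Pre_es2filR ins sogl xIndex yIndex) := by unfold Pre_es2filR; infer_instance

def pvWitness_es2filR : List Int × Int × Int × Int := ([0, 1, 0, -2], 1, 0, 0)

def Spec_es2filR (ins : List Int) (sogl : Int) (xIndex : Int) (yIndex : Int) (out : Int) : Prop := out = es2filR_alt ins sogl xIndex yIndex
instance (ins : List Int) (sogl : Int) (xIndex : Int) (yIndex : Int) (out : Int) : Decidable (Spec_es2filR ins sogl xIndex yIndex out) := by unfold Spec_es2filR; infer_instance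

-- ===== CLAIM (what is proved, stated in full; the proofs are below) =====
def Claim_equal_es2filR : Prop := ∀ (ins : List Int) (sogl : Int) (xIndex : Int) (yIndex : Int), Dom_es2filR ins sogl xIndex yIndex → Pre_es2filR ins sogl xIndex yIndex → Spec_es2filR ins sogl xIndex yIndex (es2filR ins sogl xIndex yIndex)

-- ===== LEMMAS AND PROOFS =====

-- the set A examines at state (x, y), and proof-side abbreviations
def pvSet (ins : List Int) (x y : Int) : List Int :=
  PySem.List.slice ins none (some x) ++ PySem.List.slice ins (some (PySem.List.len ins - y)) none

-- one unfolding of A's recursion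
theorem es2filR_eq (ins : List Int) (sogl x y : Int) :
    es2filR ins sogl x y =
      if (pvSet ins x y).sum ≤ sogl ∧ x + y < PySem.List.len ins then
        max ((PySem.List.count (pvSet ins x y) 0 : Int))
          (max (es2filR ins sogl (x + 1) y) (es2filR ins sogl x (y + 1)))
      else 0 := by
  rw [es2filR]
  simp only [pvSet, dite_eq_ite]

-- tables characterisation
theorem altTables_eq (ins : List Int) :
    altTables ins =
      ((List.range (ins.length + 1)).map (fun k => (ins.take k).sum),
       (List.range (ins.length + 1)).map (fun k => ((ins.take k).count 0 : Int)),
       ins.sum, (ins.count 0 : Int)) := by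
  induction ins using List.reverseRecOn with
  | nil => rfl
  | append_singleton l a ih =>
      simp only [altTables] at ih ⊢
      rw [List.foldl_append, ih]
      simp only [List.foldl_cons, List.foldl_nil]
      have hmapP : (List.range (l.length + 1)).map (fun k => ((l ++ [a]).take k).sum)
          = (List.range (l.length + 1)).map (fun k => (l.take k).sum) :=
        List.map_congr_left (fun k hk => by
          rw [List.take_append_of_le_length (Nat.lt_succ_iff.mp (List.mem_range.mp hk))])
      have hmapZ : (List.range (l.length + 1)).map (fun k => (((l ++ [a]).take k).count 0 : Int))
          = (List.range (l.length + 1)).map (fun k => ((l.take k).count 0 : Int)) :=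
        List.map_congr_left (fun k hk => by
          rw [List.take_append_of_le_length (Nat.lt_succ_iff.mp (List.mem_range.mp hk))])
      have htk : (l ++ [a]).take (l.length + 1) = l ++ [a] := List.take_of_length_le (by simp)
      have h1 : (List.range ((l ++ [a]).length + 1)).map (fun k => ((l ++ [a]).take k).sum)
          = (List.range (l.length + 1)).map (fun k => (l.take k).sum) ++ [l.sum + a] := by
        rw [show (l ++ [a]).length + 1 = (l.length + 1) + 1 by simp, List.range_succ,
          List.map_append, hmapP]
        simp [htk]
      have h2 : (List.range ((l ++ [a]).length + 1)).map (fun k => (((l ++ [a]).take k).count 0 : Int))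
          = (List.range (l.length + 1)).map (fun k => ((l.take k).count 0 : Int))
            ++ [(l.count 0 : Int) + if a = 0 then 1 else 0] := by
        rw [show (l ++ [a]).length + 1 = (l.length + 1) + 1 by simp, List.range_succ,
          List.map_append, hmapZ]
        simp only [List.map_cons, List.map_nil, htk, List.count_append, List.count_singleton]
        split_ifs with h <;> simp_all
      rw [h1, h2]
      simp only [List.sum_append, List.sum_singleton, List.count_append, List.count_singleton]
      split_ifs with h <;> simp_all

theorem altClamp_eq (n' : Nat) (i : Int) : altClamp (n' : Int) i = ((PySem.List.clampIdx n' i : Nat) : Int) := by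
  simp only [altClamp, PySem.List.clampIdx]
  split_ifs <;> push_cast <;> omega

-- stats computes the slice sum and slice zero-count, for ALL integer indices
theorem altStats_eq (ins : List Int) (x y : Int) :
    altStats (altTables ins).1 (altTables ins).2.1 (PySem.List.len ins) x y
      = ((pvSet ins x y).sum, (PySem.List.count (pvSet ins x y) 0 : Int)) := by
  have hslice : PySem.List.slice ins none (some x) = ins.take (PySem.List.clampIdx ins.length x) := by
    simp [PySem.List.slice]
  have hset : pvSet ins x y
      = ins.take (PySem.List.clampIdx ins.length x)
        ++ ins.drop (PySem.List.clampIdx ins.length ((ins.length : Int) - y)) := by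
    rw [pvSet, hslice, PySem.List.slice_some_none, PySem.List.len_eq]
  have he := Nat.lt_succ_of_le (PySem.List.clampIdx_le ins.length x)
  have ht := Nat.lt_succ_of_le (PySem.List.clampIdx_le ins.length ((ins.length : Int) - y))
  have hsum : (ins.take (PySem.List.clampIdx ins.length ((ins.length : Int) - y))).sum
      + (ins.drop (PySem.List.clampIdx ins.length ((ins.length : Int) - y))).sum = ins.sum := by
    rw [← List.sum_append, List.take_append_drop]
  have hcnt : (ins.take (PySem.List.clampIdx ins.length ((ins.length : Int) - y))).count 0
      + (ins.drop (PySem.List.clampIdx ins.length ((ins.length : Int) - y))).count 0 = ins.count 0 := by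
    rw [← List.count_append, List.take_append_drop]
  simp only [altStats, altTables_eq, PySem.List.len_eq, altClamp_eq, PySem.List.pyGetD_natCast,
    PySem.List.count_eq, hset]
  rw [PySem.List.getD_map_range _ _ _ _ he, PySem.List.getD_map_range _ _ _ _ ht,
    PySem.List.getD_map_range _ _ _ _ (Nat.lt_succ_self ins.length),
    PySem.List.getD_map_range _ _ _ _ he, PySem.List.getD_map_range _ _ _ _ ht,
    PySem.List.getD_map_range _ _ _ _ (Nat.lt_succ_self ins.length)]
  rw [List.take_length]
  simp only [Prod.mk.injEq, List.sum_append, List.count_append]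
  constructor
  · omega
  · push_cast; omega

-- the DP row for diagonal tot (values of A at all states (x, tot-x) of the DP)
def pvRow (ins : List Int) (sogl x0 y0 tot : Int) : List Int :=
  (List.range (tot - x0 - y0 + 1).toNat).map
    (fun k : Nat => es2filR ins sogl (x0 + (k : Int)) (tot - x0 - (k : Int)))

theorem pvRow_base (ins : List Int) (sogl x0 y0 : Int) :
    pvRow ins sogl x0 y0 (PySem.List.len ins) =
      List.replicate ((PySem.List.len ins) - x0 - y0 + 1).toNat 0 := by
  rw [pvRow, List.eq_replicate_iff]
  refine ⟨by simp, ?_⟩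
  intro b hb
  obtain ⟨k, hk, rfl⟩ := List.mem_map.mp hb
  rw [es2filR_eq, if_neg]
  simp only [PySem.List.len_eq, not_and, not_lt]
  intro _
  omega

theorem pvRow_step (ins : List Int) (sogl x0 y0 tot : Int)
    (h1 : x0 + y0 ≤ tot) (h2 : tot < PySem.List.len ins) :
    (PySem.List.pyRange 0 (tot - x0 - y0 + 1) 1).foldl
      (fun cur i =>
        let x := x0 + i
        let y := tot - x
        let sz := altStats (altTables ins).1 (altTables ins).2.1 (PySem.List.len ins) x y
        cur ++ [if sz.1 ≤ sogl then
                  max sz.2 (max (PySem.List.pyGetD (pvRow ins sogl x0 y0 (tot + 1)) i 0)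
                                (PySem.List.pyGetD (pvRow ins sogl x0 y0 (tot + 1)) (i + 1) 0))
                else 0])
      [] = pvRow ins sogl x0 y0 tot := by
  simp only [PySem.List.foldl_append_singleton_eq_map, List.nil_append, PySem.List.pyRange_one,
    List.map_map, pvRow]
  rw [show tot - x0 - y0 + 1 - 0 = tot - x0 - y0 + 1 from by ring]
  refine List.map_congr_left ?_
  intro k hk
  have hkM : k < (tot - x0 - y0 + 1).toNat := List.mem_range.mp hk
  have hM' : (tot + 1 - x0 - y0 + 1).toNat = (tot - x0 - y0 + 1).toNat + 1 := by omega
  simp only [Function.comp_apply, zero_add, altStats_eq, hM']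
  rw [show tot - (x0 + (k : Int)) = tot - x0 - (k : Int) from by ring]
  rw [PySem.List.pyGetD_natCast, show ((k : Int) + 1) = (((k + 1 : Nat)) : Int) from by push_cast; ring,
    PySem.List.pyGetD_natCast]
  rw [PySem.List.getD_map_range _ _ _ _ (Nat.lt_succ_of_lt hkM),
    PySem.List.getD_map_range _ _ _ _ (Nat.succ_lt_succ hkM)]
  rw [es2filR_eq ins sogl (x0 + (k : Int)) (tot - x0 - (k : Int))]
  rw [show x0 + (k : Int) + (tot - x0 - (k : Int)) = tot from by ring]
  rw [if_congr (and_iff_left h2) rfl rfl]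
  rw [show tot + 1 - x0 - (k : Int) = tot - x0 - (k : Int) + 1 from by ring,
    show x0 + ((k + 1 : Nat) : Int) = x0 + (k : Int) + 1 from by push_cast; ring,
    show tot + 1 - x0 - ((k + 1 : Nat) : Int) = tot - x0 - (k : Int) from by push_cast; ring]
  rw [max_comm (es2filR ins sogl (x0 + (k : Int)) (tot - x0 - (k : Int) + 1))
      (es2filR ins sogl (x0 + (k : Int) + 1) (tot - x0 - (k : Int)))]

theorem pvFold (ins : List Int) (sogl x0 y0 : Int) (a : Int)
    (h1 : x0 + y0 - 1 ≤ a) (h2 : a ≤ PySem.List.len ins - 1) :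
    (PySem.List.pyRange a (x0 + y0 - 1) (-1)).foldl
      (fun prev tot =>
        (PySem.List.pyRange 0 (tot - x0 - y0 + 1) 1).foldl
          (fun cur i =>
            let x := x0 + i
            let y := tot - x
            let sz := altStats (altTables ins).1 (altTables ins).2.1 (PySem.List.len ins) x y
            cur ++ [if sz.1 ≤ sogl then
                      max sz.2 (max (PySem.List.pyGetD prev i 0) (PySem.List.pyGetD prev (i + 1) 0))
                    else 0])
          [])
      (pvRow ins sogl x0 y0 (a + 1)) = pvRow ins sogl x0 y0 (x0 + y0) := by
  obtain ⟨d, hd⟩ : ∃ d : Nat, a - (x0 + y0 - 1) = d := ⟨(a - (x0 + y0 - 1)).toNat, by omega⟩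
  induction d generalizing a with
  | zero =>
      rw [PySem.List.pyRange_neg_one_eq_nil (by omega), List.foldl_nil,
        show a + 1 = x0 + y0 from by omega]
  | succ d ih =>
      rw [PySem.List.pyRange_neg_one_cons (by omega), List.foldl_cons]
      have hstep := pvRow_step ins sogl x0 y0 a (by omega) (by omega)
      simp only [hstep]
      have := ih (a - 1) (by omega) (by omega) (by omega)
      rw [show a - 1 + 1 = a from by omega] at this
      exact this

-- ===== VERDICT (by name: the statement is the Claim_ definition above) =====
theorem es2filR_spec : Claim_equal_es2filR := by
  intro ins sogl x0 y0 _ _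
  unfold Spec_es2filR
  simp only [es2filR_alt, altStats_eq]
  by_cases hC : (pvSet ins x0 y0).sum ≤ sogl ∧ x0 + y0 < PySem.List.len ins
  · rw [if_neg (not_not_intro hC)]
    rw [(pvRow_base ins sogl x0 y0).symm]
    have hlt := hC.2
    have hfold := pvFold ins sogl x0 y0 (PySem.List.len ins - 1) (by omega) (by omega)
    rw [show PySem.List.len ins - 1 + 1 = PySem.List.len ins from by ring] at hfold
    simp only [altStats_eq] at hfold
    rw [hfold, pvRow, show (x0 + y0 - x0 - y0 + 1).toNat = 1 from by omega]
    simp only [List.range_one, List.map_cons, List.map_nil, PySem.List.pyGetD_zero_cons,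
      Nat.cast_zero]
    rw [show x0 + (0 : Int) = x0 from by ring, show x0 + y0 - x0 - (0 : Int) = y0 from by ring]
  · rw [if_pos hC, es2filR_eq, if_neg hC]
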